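-- pv_equiv track=rewrite | github.com/Thejshri-A/Python-1000 | 574. PM2.5 Air Classify.py | pm2_5_air_classify
-- ===== SOURCE A (Python) =====
-- def pm2_5_air_classify(concentrations):
--     classify=[]
--     for concentration in concentrations:
--         if concentration<50:
--             classify.append("Good")
--         elif concentration<100:
--             classify.append("Moderate")
--         else:
--             classify.append("Not Good")
--     return classify
-- ===== SOURCE B (Python) =====
-- def pm2_5_air_classify(concentrations):
--     # Staged refinement: start every label at the worst class, then make one full
--     # pass per threshold (from the highest down), relaxing the label of every
--     # concentration strictly below that threshold to the better class.
--     labels = ["Not Good"] * len(concentrations)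
--     for bound, name in ((100, "Moderate"), (50, "Good")):
--         labels = [name if c < bound else label
--                   for c, label in zip(concentrations, labels)]
--     return labels
-- ===== Notes on version B (the rewrite author's own statement) =====
-- stated objective: alternative
-- what changed: Replaces A's single accumulator pass with an if/elif/else ladder by a staged-refinement algorithm: initialise all labels to the worst class, then one zip pass per threshold (highest first) relaxing labels below that threshold to the better class.
import Mathlib
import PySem

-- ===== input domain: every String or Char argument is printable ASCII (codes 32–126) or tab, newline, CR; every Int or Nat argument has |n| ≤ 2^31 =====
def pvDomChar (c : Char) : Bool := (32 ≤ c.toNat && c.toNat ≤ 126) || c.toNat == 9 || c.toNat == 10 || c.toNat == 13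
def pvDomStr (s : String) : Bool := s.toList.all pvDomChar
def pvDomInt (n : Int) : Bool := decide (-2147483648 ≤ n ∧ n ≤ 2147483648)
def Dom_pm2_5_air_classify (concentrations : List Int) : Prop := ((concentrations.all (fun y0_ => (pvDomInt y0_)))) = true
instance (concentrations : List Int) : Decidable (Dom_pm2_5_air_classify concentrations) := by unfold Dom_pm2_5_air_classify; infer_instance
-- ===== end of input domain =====

-- B replaces A's single-pass if/elif ladder by staged refinement: all labels start at "Not Good",
-- then one zip pass per threshold (highest first) relaxes labels below it (alternative; same cost).
-- ===== PORT A =====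
def pm2_5_air_classify (concentrations : List Int) : List String :=
  concentrations.foldl (fun classify concentration =>
    if concentration < 50 then classify ++ ["Good"]
    else if concentration < 100 then classify ++ ["Moderate"]
    else classify ++ ["Not Good"]) []

-- ===== PORT B =====
def pm2_5_air_classify_alt (concentrations : List Int) : List String :=
  [((100 : Int), "Moderate"), ((50 : Int), "Good")].foldl
    (fun labels bn =>
      (concentrations.zip labels).map (fun cl => if cl.1 < bn.1 then bn.2 else cl.2))
    (concentrations.map (fun _ => "Not Good"))

-- ===== PRECONDITION & SPEC =====
def Spec_pm2_5_air_classify (concentrations : List Int) (out : List String) : Prop := out = pm2_5_air_classify_alt concentrations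
instance (concentrations : List Int) (out : List String) : Decidable (Spec_pm2_5_air_classify concentrations out) := by unfold Spec_pm2_5_air_classify; infer_instance

-- ===== CLAIM (what is proved, stated in full; the proofs are below) =====
def Claim_equal_pm2_5_air_classify : Prop := ∀ (concentrations : List Int), Dom_pm2_5_air_classify concentrations → Spec_pm2_5_air_classify concentrations (pm2_5_air_classify concentrations)

-- ===== LEMMAS AND PROOFS =====

-- ===== VERDICT (by name: the statement is the Claim_ definition above) =====
-- B's staged passes collapse to a single map (zip of a list with a map over itself is a map)
theorem pm2_5_alt_eq_map (concentrations : List Int) :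
    pm2_5_air_classify_alt concentrations
      = concentrations.map (fun c =>
          if c < 50 then "Good" else if c < 100 then "Moderate" else "Not Good") := by
  unfold pm2_5_air_classify_alt
  simp only [List.foldl]
  have hz : ∀ (f : Int → String) (g : Int × String → String),
      (List.map g ((concentrations.zip (concentrations.map f))))
        = concentrations.map (fun c => g (c, f c)) := by
    intro f g
    induction concentrations with
    | nil => simp
    | cons c cs ih => simp [ih]
  rw [hz, hz]

theorem pm2_5_a_foldl (concentrations : List Int) (acc : List String) :
    concentrations.foldl (fun classify concentration =>
      if concentration < 50 then classify ++ ["Good"]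
      else if concentration < 100 then classify ++ ["Moderate"]
      else classify ++ ["Not Good"]) acc
    = acc ++ concentrations.map (fun c =>
        if c < 50 then "Good" else if c < 100 then "Moderate" else "Not Good") := by
  induction concentrations generalizing acc with
  | nil => simp
  | cons c cs ih =>
    simp only [List.foldl, List.map]
    by_cases h1 : c < 50
    · simp [h1, ih]
    · by_cases h2 : c < 100 <;> simp [h1, h2, ih]

theorem pm2_5_air_classify_spec : Claim_equal_pm2_5_air_classify := by
  intro concentrations _
  unfold Spec_pm2_5_air_classify pm2_5_air_classify
  rw [pm2_5_alt_eq_map]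
  simpa using pm2_5_a_foldl concentrations []
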